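-- pv_equiv track=rewrite | github.com/acdh-oeaw/AMC_Corpus_Biases | scripts/utils/graph_io.py | filter_doc
-- ===== SOURCE A (Python) =====
-- def filter_doc(docsrc, date, start, end, ressort):
--     ret = ""
--     if(start and end):
--         ret = "USING INDEX d:Document(date)\n"
--         ret += "Where d.date >= " + str(start) + " and d.date <= " + str(end)
--     elif(date):
--         ret = "USING INDEX d:Document(date)\n"
--         ret += "Where d.date = " + str(date)
--
--     if(docsrc):
--         if(ret):
--             ret += " and d.docsrc in " + str(docsrc)
--         else:
--             ret = "Where d.docsrc in " + str(docsrc)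
--
--     if(ressort):
--         if(ret):
--             ret += " and (d.ressort CONTAINS '" + str(ressort[0]) + "'"
--         else:
--             ret = "Where (d.ressort CONTAINS '" + str(ressort[0]) + "'"
--
--         for i in range(1, len(ressort)):
--             ret += " or d.ressort CONTAINS '" + str(ressort[i]) + "'"
--         ret += ")"
--
--     return ret
-- ===== SOURCE B (Python) =====
-- def filter_doc(docsrc, date, start, end, ressort):
--     prefix = ""
--     conds = []
--     if start and end:
--         prefix = "USING INDEX d:Document(date)\n"
--         conds.append("d.date >= " + str(start) + " and d.date <= " + str(end))
--     elif date:
--         prefix = "USING INDEX d:Document(date)\n"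
--         conds.append("d.date = " + str(date))
--     if docsrc:
--         conds.append("d.docsrc in " + str(docsrc))
--     if ressort:
--         conds.append("(" + " or ".join("d.ressort CONTAINS '" + str(r) + "'" for r in ressort) + ")")
--     if not conds:
--         return ""
--     return prefix + "Where " + " and ".join(conds)
-- ===== Notes on version B (the rewrite author's own statement) =====
-- stated objective: simpler
-- what changed: A grows one string through an if-chain, re-testing at every step whether the accumulated string is non-empty to decide between 'Where ' and ' and ' prefixes; B separates the computation into a prefix plus a list of condition strings collected independently and assembled once with ' and '.join, removing all of A's stateful non-emptiness branching.
import Mathlib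
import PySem

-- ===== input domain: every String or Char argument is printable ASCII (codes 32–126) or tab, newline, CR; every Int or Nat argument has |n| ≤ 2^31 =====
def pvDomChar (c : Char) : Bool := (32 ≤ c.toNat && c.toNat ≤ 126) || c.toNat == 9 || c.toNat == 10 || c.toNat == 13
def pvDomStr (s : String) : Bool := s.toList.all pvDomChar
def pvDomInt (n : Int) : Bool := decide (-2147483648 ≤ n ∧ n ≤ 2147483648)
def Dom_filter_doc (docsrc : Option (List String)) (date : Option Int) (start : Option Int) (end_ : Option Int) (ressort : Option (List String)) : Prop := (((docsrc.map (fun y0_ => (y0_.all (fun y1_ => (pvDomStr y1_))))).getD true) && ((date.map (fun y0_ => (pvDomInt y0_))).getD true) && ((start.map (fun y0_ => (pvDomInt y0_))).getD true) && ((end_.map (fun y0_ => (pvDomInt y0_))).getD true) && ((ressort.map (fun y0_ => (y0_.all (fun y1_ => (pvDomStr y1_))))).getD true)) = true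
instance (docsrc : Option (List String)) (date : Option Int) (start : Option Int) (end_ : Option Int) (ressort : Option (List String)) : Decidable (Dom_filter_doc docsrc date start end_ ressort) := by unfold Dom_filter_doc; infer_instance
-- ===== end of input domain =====

-- B replaces A's stateful "is ret non-empty yet" string growing by a collect-then-join assembly
-- (prefix + list of condition strings joined with " and "); objective: simpler. Same return value.

-- ===== PORT A =====
-- shared helpers: Python truthiness of the optional arguments, and str() of a list of strings
-- (Python's repr-based list display; exact on the Dom alphabet: printable ASCII plus tab/newline/CR,
-- including Python's quote-choice rule and its \\ \' \t \n \r escapes).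
def pyTruthyInt (o : Option Int) : Bool :=
  match o with
  | none => false
  | some n => n != 0

def pyTruthyList (o : Option (List String)) : Bool :=
  match o with
  | none => false
  | some l => !l.isEmpty

def pyReprCharsQ (q : Char) (cs : List Char) : List Char :=
  cs.flatMap (fun c =>
    if c = '\\' then ['\\', '\\']
    else if c = q then ['\\', q]
    else if c = Char.ofNat 9 then ['\\', 't']
    else if c = Char.ofNat 10 then ['\\', 'n']
    else if c = Char.ofNat 13 then ['\\', 'r']
    else [c])

def pyReprStr (s : String) : String :=
  let cs := s.toList
  let q : Char := if cs.contains '\'' && !(cs.contains '"') then '"' else '\''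
  String.ofList (q :: (pyReprCharsQ q cs ++ [q]))

def pyStrOfStrList (l : List String) : String :=
  "[" ++ PySem.Str.join ", " (l.map pyReprStr) ++ "]"

-- literal transliteration of A: ret grows through the if-chain, each later clause checking 'if ret'
def filter_doc (docsrc : Option (List String)) (date : Option Int) (start : Option Int) (end_ : Option Int) (ressort : Option (List String)) : String :=
  let ret : String := ""
  let ret : String :=
    if pyTruthyInt start && pyTruthyInt end_ then
      "USING INDEX d:Document(date)\n" ++ "Where d.date >= " ++ PySem.Int.toStr (start.getD 0) ++ " and d.date <= " ++ PySem.Int.toStr (end_.getD 0)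
    else if pyTruthyInt date then
      "USING INDEX d:Document(date)\n" ++ "Where d.date = " ++ PySem.Int.toStr (date.getD 0)
    else ret
  let ret : String :=
    if pyTruthyList docsrc then
      if ret ≠ "" then ret ++ " and d.docsrc in " ++ pyStrOfStrList (docsrc.getD [])
      else "Where d.docsrc in " ++ pyStrOfStrList (docsrc.getD [])
    else ret
  let ret : String :=
    if pyTruthyList ressort then
      let rl := ressort.getD []
      let ret :=
        if ret ≠ "" then ret ++ " and (d.ressort CONTAINS '" ++ PySem.List.pyGetD rl 0 "" ++ "'"
        else "Where (d.ressort CONTAINS '" ++ PySem.List.pyGetD rl 0 "" ++ "'"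
      let ret := (PySem.List.pyRange 1 (PySem.List.len rl) 1).foldl
        (fun r i => r ++ " or d.ressort CONTAINS '" ++ PySem.List.pyGetD rl i "" ++ "'") ret
      ret ++ ")"
    else ret
  ret

-- ===== PORT B =====
-- literal transliteration of B: compute (prefix, conditions), then join
def filter_doc_alt (docsrc : Option (List String)) (date : Option Int) (start : Option Int) (end_ : Option Int) (ressort : Option (List String)) : String :=
  let pc : String × List String :=
    if pyTruthyInt start && pyTruthyInt end_ then
      ("USING INDEX d:Document(date)\n",
       ["d.date >= " ++ PySem.Int.toStr (start.getD 0) ++ " and d.date <= " ++ PySem.Int.toStr (end_.getD 0)])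
    else if pyTruthyInt date then
      ("USING INDEX d:Document(date)\n", ["d.date = " ++ PySem.Int.toStr (date.getD 0)])
    else ("", [])
  let prefix_ := pc.1
  let conds := pc.2
  let conds :=
    if pyTruthyList docsrc then conds ++ ["d.docsrc in " ++ pyStrOfStrList (docsrc.getD [])]
    else conds
  let conds :=
    if pyTruthyList ressort then
      conds ++ ["(" ++ PySem.Str.join " or " ((ressort.getD []).map (fun r => "d.ressort CONTAINS '" ++ r ++ "'")) ++ ")"]
    else conds
  if conds.isEmpty then "" else prefix_ ++ "Where " ++ PySem.Str.join " and " conds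

-- ===== PRECONDITION & SPEC =====
def Spec_filter_doc (docsrc : Option (List String)) (date : Option Int) (start : Option Int) (end_ : Option Int) (ressort : Option (List String)) (out : String) : Prop := out = filter_doc_alt docsrc date start end_ ressort
instance (docsrc : Option (List String)) (date : Option Int) (start : Option Int) (end_ : Option Int) (ressort : Option (List String)) (out : String) : Decidable (Spec_filter_doc docsrc date start end_ ressort out) := by unfold Spec_filter_doc; infer_instance

-- ===== CLAIM (what is proved, stated in full; the proofs are below) =====
def Claim_equal_filter_doc : Prop := ∀ (docsrc : Option (List String)) (date : Option Int) (start : Option Int) (end_ : Option Int) (ressort : Option (List String)), Dom_filter_doc docsrc date start end_ ressort → Spec_filter_doc docsrc date start end_ ressort (filter_doc docsrc date start end_ ressort)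

-- ===== LEMMAS AND PROOFS =====

theorem pyTruthyList_eq_true_iff (o : Option (List String)) :
    pyTruthyList o = true ↔ ∃ l, o = some l ∧ l ≠ [] := by
  cases o with
  | none => simp [pyTruthyList]
  | some l => cases l <;> simp [pyTruthyList]

-- toList of A's ressort tail loop (after the pyRange fold is reduced to a fold over the tail)
theorem toList_ressort_fold (t : List String) (s : String) :
    (t.foldl (fun a x => a ++ " or d.ressort CONTAINS '" ++ x ++ "'") s).toList
    = s.toList ++ t.flatMap (fun x => " or d.ressort CONTAINS '".toList ++ x.toList ++ ['\'']) := by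
  induction t generalizing s with
  | nil => simp
  | cons x xs ih => simp [ih]

-- Chars-level form of the " or "-join that simp's normal form exposes
theorem chars_join_or (c : List Char) (t : List String) :
    PySem.Chars.join [' ', 'o', 'r', ' ']
      (c :: t.map (String.toList ∘ fun r => "d.ressort CONTAINS '" ++ r ++ "'"))
    = c ++ t.flatMap (fun x => " or d.ressort CONTAINS '".toList ++ x.toList ++ ['\'']) := by
  induction t generalizing c with
  | nil => simp [PySem.Chars.join_singleton]
  | cons x xs ih =>
      rw [List.map_cons, PySem.Chars.join_cons_cons, ih]
      simp [String.toList_append]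

theorem str_eq_of_toList {a b : String} (h : a.toList = b.toList) : a = b := by
  have := congrArg String.ofList h
  simpa [String.ofList_toList] using this

theorem filter_doc_eq_alt (docsrc : Option (List String)) (date : Option Int) (start : Option Int) (end_ : Option Int) (ressort : Option (List String)) :
    filter_doc docsrc date start end_ ressort = filter_doc_alt docsrc date start end_ ressort := by
  cases hr : pyTruthyList ressort with
  | true =>
    obtain ⟨rl, hrl, hne⟩ := (pyTruthyList_eq_true_iff ressort).mp hr
    subst hrl
    cases rl with
    | nil => exact absurd rfl hne
    | cons h t =>
      have hfold :
          ∀ s : String,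
            (PySem.List.pyRange 1 ((t.length : Int) + 1) 1).foldl
              (fun r i => r ++ " or d.ressort CONTAINS '" ++ PySem.List.pyGetD (h :: t) i "" ++ "'") s
            = t.foldl (fun a x => a ++ " or d.ressort CONTAINS '" ++ x ++ "'") s := by
        intro s
        have := PySem.List.foldl_pyRange_pyGetD (xs := h :: t) (d := "")
          (f := fun a x => a ++ " or d.ressort CONTAINS '" ++ x ++ "'") (a := 1)
          (init := s) (by norm_num)
        simpa using this
      cases h1 : (pyTruthyInt start && pyTruthyInt end_) <;>
        cases h2 : pyTruthyInt date <;>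
        cases h3 : pyTruthyList docsrc <;>
        · apply str_eq_of_toList
          simp [filter_doc, filter_doc_alt, h1, h2, h3, hr, hfold,
            toList_ressort_fold, chars_join_or, String.toList_append,
            PySem.Str.join, PySem.Chars.join_singleton, PySem.Chars.join_cons_cons]
  | false =>
    cases h1 : (pyTruthyInt start && pyTruthyInt end_) <;>
      cases h2 : pyTruthyInt date <;>
      cases h3 : pyTruthyList docsrc <;>
      · apply str_eq_of_toList
        simp [filter_doc, filter_doc_alt, h1, h2, h3, hr, String.toList_append,
          PySem.Str.join, PySem.Chars.join_singleton, PySem.Chars.join_cons_cons]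

-- ===== VERDICT (by name: the statement is the Claim_ definition above) =====
theorem filter_doc_spec : Claim_equal_filter_doc := by
  intro docsrc date start end_ ressort _
  unfold Spec_filter_doc
  exact filter_doc_eq_alt docsrc date start end_ ressort
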